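-- pv_equiv track=rewrite | github.com/daniel-reich/turbo-robot | tfbKAYwHq2ot2FK3i_13.py | non_repeats
-- ===== SOURCE A (Python) =====
-- def non_repeats(radix):
--   if(radix==2):
--     return 2
--   s=1
--   k=radix-1
--   for i in range(2,radix+1):
--     s+=k
--     k*=(radix-i)
--   s=s*(radix-1)
--   return s
-- ===== SOURCE B (Python) =====
-- def non_repeats(radix):
--     t = 1
--     for a in range(1, radix):
--         t = 1 + a * t
--     return t * (radix - 1)
-- ===== Notes on version B (the rewrite author's own statement) =====
-- stated objective: simpler
-- what changed: B evaluates the factorial sum back-to-front as a Horner scheme t = 1 + a*t over range(1, radix) with a single accumulator, eliminating A's (s,k) pair of running sum and running product and the radix==2 special case.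
import Mathlib
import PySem

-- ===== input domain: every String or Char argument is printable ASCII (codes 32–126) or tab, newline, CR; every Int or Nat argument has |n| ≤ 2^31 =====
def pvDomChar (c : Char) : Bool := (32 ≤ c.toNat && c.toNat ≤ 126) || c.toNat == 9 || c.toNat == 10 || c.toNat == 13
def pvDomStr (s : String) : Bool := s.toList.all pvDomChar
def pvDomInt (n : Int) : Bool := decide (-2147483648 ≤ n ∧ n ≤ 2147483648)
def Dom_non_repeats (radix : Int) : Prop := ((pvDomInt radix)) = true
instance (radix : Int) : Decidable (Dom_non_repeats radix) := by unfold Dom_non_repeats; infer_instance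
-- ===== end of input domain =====

-- B evaluates the same factorial sum back-to-front as a Horner scheme with one accumulator,
-- dropping A's (running sum, running product) pair and its radix==2 special case (simpler).

-- ===== PORT A =====
def non_repeats (radix : Int) : Int :=
  if radix = 2 then 2
  else
    ((PySem.List.pyRange 2 (radix + 1) 1).foldl
      (fun (sk : Int × Int) i => (sk.1 + sk.2, sk.2 * (radix - i))) (1, radix - 1)).1
      * (radix - 1)

-- ===== PORT B =====
def non_repeats_alt (radix : Int) : Int :=
  ((PySem.List.pyRange 1 radix 1).foldl (fun t a => 1 + a * t) 1) * (radix - 1)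

-- ===== PRECONDITION & SPEC =====
def Spec_non_repeats (radix : Int) (out : Int) : Prop := out = non_repeats_alt radix
instance (radix : Int) (out : Int) : Decidable (Spec_non_repeats radix out) := by unfold Spec_non_repeats; infer_instance

-- ===== CLAIM (what is proved, stated in full; the proofs are below) =====
def Claim_equal_non_repeats : Prop := ∀ (radix : Int), Dom_non_repeats radix → Spec_non_repeats radix (non_repeats radix)

-- ===== LEMMAS AND PROOFS =====

-- "H": the multiplier accumulated by A's loop ahead of the current k
def pvH (r : Int) : List Int → Int
  | [] => 0
  | i :: t => 1 + (r - i) * pvH r t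

lemma pvFoldA (r : Int) : ∀ (l : List Int) (s k : Int),
    (l.foldl (fun (sk : Int × Int) i => (sk.1 + sk.2, sk.2 * (r - i))) (s, k)).1
      = s + k * pvH r l := by
  intro l
  induction l with
  | nil => intro s k; simp [pvH]
  | cons i t ih => intro s k; simp only [List.foldl_cons, pvH, ih]; ring

lemma pvRangeEq : ∀ (n : Nat) (a : Int),
    PySem.List.pyRange a (a + (n : Int)) 1 = (List.range n).map (fun k : Nat => a + (k : Int)) := by
  intro n
  induction n with
  | zero => intro a; simp [PySem.List.pyRange_one_eq_nil]
  | succ m ih =>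
      intro a
      rw [PySem.List.pyRange_one_cons (by push_cast; omega)]
      rw [List.range_succ_eq_map, List.map_cons, List.map_map]
      congr 1
      · push_cast; ring
      · have h1 : a + ((m + 1 : Nat) : Int) = (a + 1) + (m : Int) := by push_cast; ring
        rw [h1, ih (a + 1)]
        apply List.map_congr_left
        intro x _
        simp only [Function.comp_apply]
        push_cast
        ring

lemma pvH_range (r : Int) : ∀ (n : Nat) (a : Int),
    pvH r ((List.range n).map (fun k : Nat => a + (k : Int)))
      = ∑ t ∈ Finset.range n, ∏ j ∈ Finset.range t, (r - a - (j : Int)) := by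
  intro n
  induction n with
  | zero => intro a; simp [pvH]
  | succ m ih =>
      intro a
      rw [List.range_succ_eq_map]
      simp only [List.map_cons, List.map_map, pvH]
      have h1 : ((List.range m).map ((fun k : Nat => a + (k : Int)) ∘ Nat.succ))
          = (List.range m).map (fun k : Nat => (a + 1) + (k : Int)) := by
        apply List.map_congr_left; intro x _; simp only [Function.comp_apply]; push_cast; ring
      rw [h1, ih (a + 1), Finset.sum_range_succ']
      have h2 : ∀ t ∈ Finset.range m,
          (∏ j ∈ Finset.range (t + 1), (r - a - ((j : Nat) : Int)))
            = (r - a) * ∏ j ∈ Finset.range t, (r - (a + 1) - (j : Int)) := by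
        intro t _
        rw [Finset.prod_range_succ']
        rw [Finset.prod_congr rfl (fun j _ => by push_cast; ring :
          ∀ j ∈ Finset.range t, (r - a - (((j + 1 : Nat)) : Int)) = (r - (a + 1) - (j : Int)))]
        push_cast
        ring
      rw [Finset.sum_congr rfl h2, ← Finset.mul_sum]
      rw [Finset.prod_range_zero]
      ring

lemma pvHornerEq : ∀ (n : Nat),
    (((List.range n).map (fun k : Nat => (1 : Int) + (k : Int))).foldl (fun t a => 1 + a * t) 1)
      = ∑ m ∈ Finset.range (n + 1), ∏ j ∈ Finset.range m, ((n : Int) - (j : Int)) := by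
  intro n
  induction n with
  | zero => simp
  | succ m ih =>
      rw [List.range_succ, List.map_append, List.foldl_append, ih]
      simp only [List.map_cons, List.map_nil, List.foldl_cons, List.foldl_nil]
      rw [Finset.sum_range_succ' (fun t => ∏ j ∈ Finset.range t, (((m + 1 : Nat) : Int) - (j : Int)))]
      have h2 : ∀ t ∈ Finset.range (m + 1),
          (∏ j ∈ Finset.range (t + 1), (((m + 1 : Nat) : Int) - (j : Int)))
            = ((1 : Int) + (m : Int)) * ∏ j ∈ Finset.range t, ((m : Int) - (j : Int)) := by
        intro t _
        rw [Finset.prod_range_succ']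
        rw [Finset.prod_congr rfl (fun j _ => by push_cast; ring :
          ∀ j ∈ Finset.range t, (((m + 1 : Nat) : Int) - (((j + 1 : Nat)) : Int)) = ((m : Int) - (j : Int)))]
        push_cast
        ring
      rw [Finset.sum_congr rfl h2, ← Finset.mul_sum]
      rw [Finset.prod_range_zero]
      ring

-- the core identity linking A's accumulated sum to the Horner value
lemma pvCore2 (n : Nat) (r : Int) (hr : r = 1 + (n : Int)) :
    (∑ m ∈ Finset.range (n + 1), ∏ j ∈ Finset.range m, ((n : Int) - (j : Int)))
      = 1 + (r - 1) * ∑ t ∈ Finset.range n, ∏ j ∈ Finset.range t, (r - 2 - (j : Int)) := by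
  subst hr
  rw [Finset.sum_range_succ' (fun m => ∏ j ∈ Finset.range m, ((n : Int) - (j : Int)))]
  have h2 : ∀ t ∈ Finset.range n,
      (∏ j ∈ Finset.range (t + 1), ((n : Int) - (j : Int)))
        = (1 + (n : Int) - 1) * ∏ j ∈ Finset.range t, ((1 + (n : Int)) - 2 - (j : Int)) := by
    intro t _
    rw [Finset.prod_range_succ']
    rw [Finset.prod_congr rfl (fun j _ => by push_cast; ring :
      ∀ j ∈ Finset.range t, ((n : Int) - (((j + 1 : Nat)) : Int)) = ((1 + (n : Int)) - 2 - (j : Int)))]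
    push_cast
    ring
  rw [Finset.sum_congr rfl h2, ← Finset.mul_sum]
  rw [Finset.prod_range_zero]
  ring

lemma pv_main (radix : Int) : non_repeats radix = non_repeats_alt radix := by
  by_cases h2 : radix = 2
  · subst h2; decide
  · unfold non_repeats non_repeats_alt
    rw [if_neg h2]
    by_cases hle : radix ≤ 1
    · rw [PySem.List.pyRange_one_eq_nil (by omega), PySem.List.pyRange_one_eq_nil (by omega)]
      simp
    · obtain ⟨n, hn⟩ : ∃ n : Nat, radix = 1 + (n : Int) := ⟨(radix - 1).toNat, by omega⟩
      have hA : PySem.List.pyRange 2 (radix + 1) 1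
          = (List.range n).map (fun k : Nat => (2 : Int) + (k : Int)) := by
        rw [show radix + 1 = 2 + (n : Int) by omega]; exact pvRangeEq n 2
      have hB : PySem.List.pyRange 1 radix 1
          = (List.range n).map (fun k : Nat => (1 : Int) + (k : Int)) := by
        rw [show radix = 1 + (n : Int) from hn]; exact pvRangeEq n 1
      rw [hA, hB, pvFoldA, pvH_range, pvHornerEq n]
      rw [pvCore2 n radix hn]

-- ===== VERDICT (by name: the statement is the Claim_ definition above) =====
theorem non_repeats_spec : Claim_equal_non_repeats := by
  intro radix _
  unfold Spec_non_repeats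
  exact pv_main radix
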